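-- pv_equiv track=rewrite | github.com/m09irul/Carla | tt.py | get_left_right_indexes
-- ===== SOURCE A (Python) =====
-- def get_left_right_indexes(waypoint_list):
--     indexes = []
--     last_found = None
--     for i, (_, road_option) in enumerate(waypoint_list):
--         if road_option in ['left', 'right'] and road_option != last_found:
--             indexes.append(i)
--             last_found = road_option
--         elif road_option not in ['left', 'right']:
--             last_found = None
--     return indexes
-- ===== SOURCE B (Python) =====
-- def get_left_right_indexes(waypoint_list):
--     opts = [ro if ro in ('left', 'right') else None for _, ro in waypoint_list]
--     indexes = []
--     i, n = 0, len(opts)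
--     while i < n:
--         j = i + 1
--         while j < n and opts[j] == opts[i]:
--             j += 1
--         if opts[i] is not None:
--             indexes.append(i)
--         i = j
--     return indexes
-- ===== Notes on version B (the rewrite author's own statement) =====
-- stated objective: alternative
-- what changed: B decomposes the normalized turn-option sequence into maximal runs of equal values with a two-level run-skipping index loop and emits the start index of each non-None run, instead of A's element-by-element pass with a last_found state machine.
import Mathlib
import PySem

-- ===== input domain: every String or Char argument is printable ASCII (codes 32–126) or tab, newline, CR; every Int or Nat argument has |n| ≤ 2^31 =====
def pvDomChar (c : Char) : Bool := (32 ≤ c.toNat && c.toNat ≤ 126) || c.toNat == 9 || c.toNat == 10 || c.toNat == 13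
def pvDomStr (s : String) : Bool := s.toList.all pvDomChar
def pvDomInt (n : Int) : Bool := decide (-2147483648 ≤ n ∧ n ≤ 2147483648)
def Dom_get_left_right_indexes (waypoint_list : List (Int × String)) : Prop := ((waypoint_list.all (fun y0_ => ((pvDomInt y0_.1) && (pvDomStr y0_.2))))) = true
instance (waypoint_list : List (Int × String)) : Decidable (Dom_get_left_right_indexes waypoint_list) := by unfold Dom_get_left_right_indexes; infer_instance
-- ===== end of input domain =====

-- B replaces A's last_found state machine by a run-length decomposition of the normalized
-- option sequence (emit the start index of each maximal non-None run); objective: alternative.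

-- ===== PORT A =====
-- A: one loop over enumerate(waypoint_list) carrying (indexes, last_found).
def get_left_right_indexes (waypoint_list : List (Int × String)) : List Int :=
  ((PySem.List.enumerate waypoint_list).foldl
    (fun (st : List Int × Option String) x =>
      let road_option := x.2.2
      if (road_option = "left" ∨ road_option = "right") ∧ some road_option ≠ st.2 then
        (st.1 ++ [x.1], some road_option)
      else if ¬ (road_option = "left" ∨ road_option = "right") then
        (st.1, none)
      else st)
    ([], none)).1

-- ===== PORT B =====
-- B helper: the outer while-loop of Source B over maximal runs; the inner while-loop
-- (advance j while opts[j] == opts[i]) is the takeWhile/dropWhile split of the tail.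
def pvRuns : List (Option String) → Int → List Int
  | [], _ => []
  | x :: xs, i =>
    (if x.isSome then [i] else []) ++
      pvRuns (xs.dropWhile (· == x)) (i + 1 + (xs.takeWhile (· == x)).length)
termination_by l _ => l.length
decreasing_by
  exact Nat.lt_succ_of_le (List.length_dropWhile_le _ _)

def get_left_right_indexes_alt (waypoint_list : List (Int × String)) : List Int :=
  let norm := waypoint_list.map
    (fun p => if p.2 = "left" ∨ p.2 = "right" then some p.2 else none)
  pvRuns norm 0

-- ===== PRECONDITION & SPEC =====
def Spec_get_left_right_indexes (waypoint_list : List (Int × String)) (out : List Int) : Prop := out = get_left_right_indexes_alt waypoint_list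
instance (waypoint_list : List (Int × String)) (out : List Int) : Decidable (Spec_get_left_right_indexes waypoint_list out) := by unfold Spec_get_left_right_indexes; infer_instance

-- ===== CLAIM (what is proved, stated in full; the proofs are below) =====
def Claim_equal_get_left_right_indexes : Prop := ∀ (waypoint_list : List (Int × String)), Dom_get_left_right_indexes waypoint_list → Spec_get_left_right_indexes waypoint_list (get_left_right_indexes waypoint_list)

-- ===== LEMMAS AND PROOFS =====

-- Proof-only intermediate form: A's loop as an adjacent-comparison scan over the
-- normalized sequence (not used by either port).
def pvAdjScan : List (Option String) → Int → Option String → List Int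
  | [], _, _ => []
  | cur :: rest, i, prev =>
    (if cur.isSome ∧ cur ≠ prev then [i] else []) ++ pvAdjScan rest (i + 1) cur

-- Invariant of A's fold: started at index i with state (acc, prev), it produces acc
-- followed by the adjacent scan of the normalized tail from prev.
theorem pv_fold_eq_scan (l : List (Int × String)) :
    ∀ (i : Int) (acc : List Int) (prev : Option String),
    ((PySem.List.enumerate l i).foldl
      (fun (st : List Int × Option String) x =>
        let r := x.2.2
        if (r = "left" ∨ r = "right") ∧ some r ≠ st.2 then (st.1 ++ [x.1], some r)
        else if ¬ (r = "left" ∨ r = "right") then (st.1, none)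
        else st)
      (acc, prev)).1
    = acc ++ pvAdjScan (l.map (fun p => if p.2 = "left" ∨ p.2 = "right" then some p.2 else none)) i prev := by
  induction l with
  | nil => intro i acc prev; simp [PySem.List.enumerate_nil, pvAdjScan]
  | cons hd tl ih =>
    intro i acc prev
    rw [PySem.List.enumerate_cons, List.foldl_cons, List.map_cons]
    by_cases hlr : hd.2 = "left" ∨ hd.2 = "right"
    · by_cases hne : some hd.2 = prev
      · simp only [pvAdjScan, hlr, hne, ne_eq, not_true_eq_false, and_false, if_neg,
          not_false_eq_true]
        rw [ih]
        simp [Option.isSome]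
      · simp only [pvAdjScan, hlr, hne, ne_eq, not_false_eq_true, and_true, if_pos]
        rw [ih]
        simp [List.append_assoc]
    · simp only [pvAdjScan, hlr, false_and, if_neg, not_false_eq_true, if_pos]
      rw [ih]
      simp

-- The adjacent scan from predecessor x equals the run scan of the tail after the
-- leading run of x's is skipped (within a run nothing is emitted; a new run starts
-- exactly where the value changes).
theorem pv_scan_eq_runs (l : List (Option String)) :
    ∀ (i : Int) (x : Option String),
    pvAdjScan l i x
      = pvRuns (l.dropWhile (· == x)) (i + (l.takeWhile (· == x)).length) := by
  induction l with
  | nil => intro i x; simp [pvAdjScan, pvRuns]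
  | cons y ys ih =>
    intro i x
    by_cases h : y = x
    · subst h
      simp only [pvAdjScan, List.dropWhile_cons, List.takeWhile_cons, beq_self_eq_true,
        if_pos, ne_eq, not_true_eq_false, and_false, if_neg, not_false_eq_true,
        List.nil_append, List.length_cons]
      rw [ih]
      congr 1
      push_cast
      ring
    · have hb : (y == x) = false := beq_eq_false_iff_ne.mpr h
      simp only [pvAdjScan, List.dropWhile_cons, List.takeWhile_cons, hb, if_neg,
        Bool.false_eq_true, not_false_eq_true, List.length_nil]
      rw [pvRuns, ih]
      simp [h]

-- ===== VERDICT (by name: the statement is the Claim_ definition above) =====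
theorem get_left_right_indexes_spec : Claim_equal_get_left_right_indexes := by
  intro wl _
  unfold Spec_get_left_right_indexes get_left_right_indexes get_left_right_indexes_alt
  have h := pv_fold_eq_scan wl 0 [] none
  simp only [List.nil_append] at h
  rw [h, pv_scan_eq_runs]
  cases hcase : wl.map (fun p => if p.2 = "left" ∨ p.2 = "right" then some p.2 else none) with
  | nil => simp
  | cons y ys =>
    by_cases hy : y = none
    · subst hy
      rw [pvRuns]
      simp only [List.dropWhile_cons, List.takeWhile_cons, beq_self_eq_true, if_pos,
        Option.isSome_none, Bool.false_eq_true, List.length_cons]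
      congr 1
      push_cast
      ring
    · simp [hy]
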